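-- pv_equiv track=rewrite | github.com/hoofyhorse/AOC | day12/day12.py | build_sub_table
-- ===== SOURCE A (Python) =====
-- def build_sub_table(length: int) -> list:
--     sub_table = []
--     num = 0
--     while True:
--         binary_list = list(str(format(num, 'b')))
--         binary_list.reverse()
--         if len(binary_list) > length: break
--
--         while len(binary_list) < length:
--             binary_list.append('0')
--
--         sub_table.append(binary_list)
--         num += 1
--     return sub_table
-- ===== SOURCE B (Python) =====
-- def build_sub_table(length: int) -> list:
--     if length <= 0:
--         return []
--     return [[str((n >> i) & 1) for i in range(length)] for n in range(2 ** length)]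
-- ===== Notes on version B (the rewrite author's own statement) =====
-- stated objective: simpler
-- what changed: Replaces the unbounded while loop that string-formats each number to binary, reverses and pads it, by a direct comprehension over range(2**length) that extracts each bit with shift-and-mask arithmetic (guarded by length <= 0 -> []).
import Mathlib
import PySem

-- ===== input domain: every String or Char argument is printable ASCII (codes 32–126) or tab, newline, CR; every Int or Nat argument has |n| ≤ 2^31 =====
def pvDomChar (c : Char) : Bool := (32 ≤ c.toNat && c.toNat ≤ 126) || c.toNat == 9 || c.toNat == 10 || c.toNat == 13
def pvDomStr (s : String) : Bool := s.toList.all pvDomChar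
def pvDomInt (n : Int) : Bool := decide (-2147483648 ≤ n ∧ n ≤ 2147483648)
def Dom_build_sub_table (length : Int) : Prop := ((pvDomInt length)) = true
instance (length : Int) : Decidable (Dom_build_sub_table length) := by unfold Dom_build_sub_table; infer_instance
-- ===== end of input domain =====

-- B replaces A's format/reverse/pad while-loop by a bit-shift comprehension over range(2**length): same values, simpler code.

-- ===== PORT A =====
-- hand port of Python's format(num,'b'): binary digits by repeated division (LSB-first
-- helper, reversed to the MSB-first string format produces); exact for all Nat
def pvBitsLSB (n : Nat) : List String :=
  if h : n = 0 then []
  else (if n % 2 = 1 then "1" else "0") :: pvBitsLSB (n / 2)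
decreasing_by exact Nat.div_lt_self (Nat.pos_of_ne_zero h) (by norm_num)

-- list(str(format(num,'b'))): MSB-first list of one-char strings
def pvBin (n : Nat) : List String := if n = 0 then ["0"] else (pvBitsLSB n).reverse

-- the inner 'while len(binary_list) < length: binary_list.append('0')'
def pvPad (bl : List String) (length : Int) : List String :=
  if _h : (bl.length : Int) < length then pvPad (bl ++ ["0"]) length else bl
termination_by (length - bl.length).toNat
decreasing_by simp; omega

-- the outer 'while True' loop; the fuel 2^length+1 is a totality bound only (the break
-- condition fires exactly then, proved below) — the body is A's body step for step
def pvLoopA (length : Int) : Nat → Nat → List (List String) → List (List String)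
  | 0, _, acc => acc
  | fuel + 1, num, acc =>
    let bl := (pvBin num).reverse
    if (bl.length : Int) > length then acc
    else pvLoopA length fuel (num + 1) (acc ++ [pvPad bl length])

def build_sub_table (length : Int) : List (List String) :=
  pvLoopA length (2 ^ length.toNat + 1) 0 []

-- ===== PORT B =====
def build_sub_table_alt (length : Int) : List (List String) :=
  if length ≤ 0 then []
  else (List.range (2 ^ length.toNat)).map (fun n =>
    (List.range length.toNat).map (fun i => PySem.Int.toStr (((n >>> i) &&& 1 : Nat) : Int)))

-- ===== PRECONDITION & SPEC =====
def Spec_build_sub_table (length : Int) (out : List (List String)) : Prop := out = build_sub_table_alt length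
instance (length : Int) (out : List (List String)) : Decidable (Spec_build_sub_table length out) := by unfold Spec_build_sub_table; infer_instance

-- ===== CLAIM (what is proved, stated in full; the proofs are below) =====
def Claim_equal_build_sub_table : Prop := ∀ (length : Int), Dom_build_sub_table length → Spec_build_sub_table length (build_sub_table length)

-- ===== LEMMAS AND PROOFS =====

-- i-th bit of n as the one-char string A/B both emit
def pvBit (n i : Nat) : String := if n.testBit i then "1" else "0"

theorem pvBitsLSB_zero : pvBitsLSB 0 = [] := by unfold pvBitsLSB; simp

theorem pvBitsLSB_pos (n : Nat) (h : n ≠ 0) :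
    pvBitsLSB n = (if n % 2 = 1 then "1" else "0") :: pvBitsLSB (n / 2) := by
  rw [pvBitsLSB]; simp [h]

theorem pvBitsLSB_len_le (L : Nat) : ∀ n : Nat, ((pvBitsLSB n).length ≤ L ↔ n < 2 ^ L) := by
  induction L with
  | zero =>
    intro n
    by_cases h : n = 0
    · subst h; simp [pvBitsLSB_zero]
    · rw [pvBitsLSB_pos n h]; simp [h]
  | succ L ih =>
    intro n
    by_cases h : n = 0
    · subst h; simp [pvBitsLSB_zero]
    · rw [pvBitsLSB_pos n h]
      simp only [List.length_cons, Nat.succ_le_succ_iff, ih (n / 2), pow_succ]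
      constructor
      · intro hd; have := Nat.div_lt_iff_lt_mul (by norm_num : 0 < 2) |>.mp hd; omega
      · intro hd; exact (Nat.div_lt_iff_lt_mul (by norm_num : 0 < 2)).mpr (by omega)

theorem pvPad_eq (len : Int) : ∀ (bl : List String),
    pvPad bl len = bl ++ List.replicate (len.toNat - bl.length) "0" := by
  have key : ∀ (k : Nat) (bl : List String), len.toNat - bl.length = k →
      pvPad bl len = bl ++ List.replicate k "0" := by
    intro k
    induction k with
    | zero =>
      intro bl hk
      rw [pvPad]
      have : ¬ ((bl.length : Int) < len) := by omega
      simp [this]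
    | succ k ih =>
      intro bl hk
      rw [pvPad]
      have : (bl.length : Int) < len := by omega
      simp only [this, dif_pos]
      rw [ih (bl ++ ["0"]) (by simp; omega)]
      simp [List.replicate_succ]
  intro bl; exact key _ bl rfl

theorem pvBits_pad (L : Nat) : ∀ n : Nat, n < 2 ^ L →
    pvBitsLSB n ++ List.replicate (L - (pvBitsLSB n).length) "0" =
      (List.range L).map (pvBit n) := by
  induction L with
  | zero =>
    intro n hn
    interval_cases n
    simp [pvBitsLSB_zero]
  | succ L ih =>
    intro n hn
    by_cases h : n = 0
    · subst h
      simp [pvBitsLSB_zero]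
      symm
      rw [List.eq_replicate_iff]
      simp [pvBit]
    · rw [pvBitsLSB_pos n h]
      have hdiv : n / 2 < 2 ^ L := by
        rw [pow_succ] at hn
        exact (Nat.div_lt_iff_lt_mul (by norm_num : 0 < 2)).mpr (by omega)
      rw [List.range_succ_eq_map]
      simp only [List.map_cons, List.map_map, List.length_cons, List.cons_append]
      have hsub : L + 1 - ((pvBitsLSB (n / 2)).length + 1) = L - (pvBitsLSB (n / 2)).length := by
        omega
      rw [hsub, ih (n / 2) hdiv]
      congr 1
      · unfold pvBit
        rw [Nat.testBit_zero]
        rcases Nat.mod_two_eq_zero_or_one n with h2 | h2 <;> simp [h2]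
      · apply List.map_congr_left
        intro i _
        simp only [Function.comp_apply, pvBit, Nat.succ_eq_add_one, Nat.testBit_add_one]

theorem pvRow_eq (L n : Nat) (hL : 1 ≤ L) (hn : n < 2 ^ L) :
    pvPad ((pvBin n).reverse) (L : Int) = (List.range L).map (pvBit n) := by
  by_cases h : n = 0
  · subst h
    have : pvBin 0 = ["0"] := by simp [pvBin]
    rw [this]
    simp only [List.reverse_singleton]
    rw [pvPad_eq]
    have h1 : ((L : Int)).toNat = L := by omega
    rw [h1]
    have : (List.range L).map (pvBit 0) = List.replicate L "0" := by
      rw [List.eq_replicate_iff]; simp [pvBit]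
    rw [this]
    cases L with
    | zero => omega
    | succ L => simp [List.replicate_succ]
  · have hb : (pvBin n).reverse = pvBitsLSB n := by simp [pvBin, h]
    rw [hb, pvPad_eq]
    have h1 : ((L : Int)).toNat = L := by omega
    rw [h1]
    exact pvBits_pad L n hn

theorem pvLoopA_eq (L : Nat) (hL : 1 ≤ L) :
    ∀ (k num : Nat) (acc : List (List String)), num + k = 2 ^ L →
      pvLoopA (L : Int) (k + 1) num acc =
        acc ++ (List.range' num k).map (fun n => (List.range L).map (pvBit n)) := by
  intro k
  induction k with
  | zero =>
    intro num acc hnum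
    rw [pvLoopA]
    have hnz : num ≠ 0 := by have : 1 ≤ 2 ^ L := Nat.one_le_two_pow; omega
    have hb : (pvBin num).reverse = pvBitsLSB num := by simp [pvBin, hnz]
    have hlen : ¬ ((pvBitsLSB num).length ≤ L) := by
      rw [pvBitsLSB_len_le]; omega
    have : ((pvBin num).reverse.length : Int) > (L : Int) := by
      rw [hb]; exact_mod_cast by omega
    rw [if_pos this]
    simp
  | succ k ih =>
    intro num acc hnum
    rw [pvLoopA]
    have hlt : num < 2 ^ L := by omega
    have hle : (pvBin num).reverse.length ≤ L := by
      by_cases h : num = 0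
      · subst h; simp [pvBin]; omega
      · have hb : (pvBin num).reverse = pvBitsLSB num := by simp [pvBin, h]
        rw [hb, pvBitsLSB_len_le]; exact hlt
    have hcond : ¬ (((pvBin num).reverse.length : Int) > (L : Int)) := by exact_mod_cast by omega
    simp only [hcond, if_false]
    rw [ih (num + 1) _ (by omega)]
    rw [List.range'_succ, List.map_cons]
    rw [pvRow_eq L num hL hlt]
    simp

theorem pvBitStr_eq (n i : Nat) :
    PySem.Int.toStr (((n >>> i) &&& 1 : Nat) : Int) = pvBit n i := by
  have ht : n.testBit i = ((n >>> i) &&& 1 == 1) := by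
    simp [Nat.testBit, Nat.and_one_is_mod, Nat.one_and_eq_mod_two]
  have h01 : (n >>> i) &&& 1 = 0 ∨ (n >>> i) &&& 1 = 1 := by
    rw [Nat.and_one_is_mod]; omega
  unfold pvBit
  rw [ht]
  rcases h01 with h | h <;> rw [h] <;> decide

-- ===== VERDICT (by name: the statement is the Claim_ definition above) =====
theorem build_sub_table_spec : Claim_equal_build_sub_table := by
  intro length _
  unfold Spec_build_sub_table build_sub_table build_sub_table_alt
  by_cases hle : length ≤ 0
  · have ht : length.toNat = 0 := by omega
    rw [ht]
    simp only [hle, if_true]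
    rw [pvLoopA]
    have hb : (pvBin 0).reverse = ["0"] := by simp [pvBin]
    have : (((pvBin 0).reverse.length : Nat) : Int) > length := by rw [hb]; simp; omega
    rw [if_pos this]
  · have hL1 : 1 ≤ length.toNat := by omega
    have hcast : ((length.toNat : Nat) : Int) = length := by omega
    have heq := pvLoopA_eq length.toNat hL1 (2 ^ length.toNat) 0 [] (by omega)
    rw [hcast] at heq
    rw [heq, if_neg hle]
    simp only [List.nil_append]
    rw [show List.range (2 ^ length.toNat) = List.range' 0 (2 ^ length.toNat) from List.range_eq_range']
    apply List.map_congr_left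
    intro n _
    apply List.map_congr_left
    intro i _
    exact (pvBitStr_eq n i).symm
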